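-- pv_equiv track=rewrite | github.com/iiehyy/TrafficCL | get_data_split_train_test.py | get_ack_rtt
-- ===== SOURCE A (Python) =====
-- def get_ack_rtt(ack_rtt,ack_rtt_up,ack_rtt_down):
--     finger=[]
--     for i in ack_rtt:
--         if i in ack_rtt_up:
--             finger.append(i*1)
--         elif i in ack_rtt_down:
--             finger.append(i*(-1))
--         else:
--             finger.append(i*0)
--     finger=pad_or_truncate(finger, target_length=13, pad_value=0)
--     return finger
--
-- def pad_or_truncate(sequence: list, target_length: int, pad_value=0) -> list:
--     """序列填充或截断到固定长度"""
--     if len(sequence) >= target_length: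
--         return sequence[:target_length]  # 截断
--     return sequence + [pad_value] * (target_length - len(sequence))  # 填充
-- ===== SOURCE B (Python) =====
-- def get_ack_rtt(ack_rtt, ack_rtt_up, ack_rtt_down):
--     up = set(ack_rtt_up)
--     down = set(ack_rtt_down)
--     n = len(ack_rtt)
--
--     def tag(i):
--         if i >= n:
--             return 0
--         v = ack_rtt[i]
--         if v in up:
--             return v
--         if v in down:
--             return -v
--         return 0
--
--     return [tag(i) for i in range(13)]
-- ===== Notes on version B (the rewrite author's own statement) =====
-- stated objective: alternative
-- what changed: B iterates over the 13 fixed output positions (comprehension over range(13)) indexing into ack_rtt with set-based membership, so padding and truncation disappear; A loops over the whole input appending tags and then pads/truncates in a second pass.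
import Mathlib
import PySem

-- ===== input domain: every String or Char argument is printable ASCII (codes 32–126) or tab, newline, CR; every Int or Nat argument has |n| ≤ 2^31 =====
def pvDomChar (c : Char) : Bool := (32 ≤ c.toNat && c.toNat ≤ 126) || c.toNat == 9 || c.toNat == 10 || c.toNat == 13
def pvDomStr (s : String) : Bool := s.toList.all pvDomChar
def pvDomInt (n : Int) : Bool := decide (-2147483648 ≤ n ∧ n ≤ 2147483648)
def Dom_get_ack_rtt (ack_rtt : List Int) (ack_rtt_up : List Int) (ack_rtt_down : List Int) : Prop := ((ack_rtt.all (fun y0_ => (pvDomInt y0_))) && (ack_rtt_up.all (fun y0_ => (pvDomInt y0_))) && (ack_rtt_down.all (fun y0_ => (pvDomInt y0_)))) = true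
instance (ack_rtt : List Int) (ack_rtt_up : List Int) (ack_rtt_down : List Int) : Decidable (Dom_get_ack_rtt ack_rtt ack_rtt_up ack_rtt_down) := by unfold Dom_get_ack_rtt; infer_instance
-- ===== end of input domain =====

-- B iterates over the 13 fixed output positions, indexing into ack_rtt with set-based
-- membership, so the separate pad/truncate pass disappears (objective: alternative).

-- ===== PORT A =====
def pad_or_truncate (sequence : List Int) (target_length : Int) (pad_value : Int) : List Int :=
  if (sequence.length : Int) ≥ target_length then
    PySem.List.slice sequence none (some target_length)
  else
    sequence ++ PySem.List.pyRepeat [pad_value] (target_length - (sequence.length : Int))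

def get_ack_rtt (ack_rtt : List Int) (ack_rtt_up : List Int) (ack_rtt_down : List Int) : List Int :=
  let finger := ack_rtt.foldl (fun finger i =>
    if i ∈ ack_rtt_up then finger ++ [i * 1]
    else if i ∈ ack_rtt_down then finger ++ [i * (-1)]
    else finger ++ [i * 0]) []
  pad_or_truncate finger 13 0

-- ===== PORT B =====
def get_ack_rtt_alt (ack_rtt : List Int) (ack_rtt_up : List Int) (ack_rtt_down : List Int) : List Int :=
  let up := PySem.Set.ofList ack_rtt_up
  let down := PySem.Set.ofList ack_rtt_down
  let n := ack_rtt.length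
  (List.range 13).map (fun i =>
    if h : i ≥ n then 0
    else
      let v := ack_rtt[i]'(by omega)
      if PySem.Set.contains up v then v
      else if PySem.Set.contains down v then -v
      else 0)

-- ===== PRECONDITION & SPEC =====
def Spec_get_ack_rtt (ack_rtt : List Int) (ack_rtt_up : List Int) (ack_rtt_down : List Int) (out : List Int) : Prop := out = get_ack_rtt_alt ack_rtt ack_rtt_up ack_rtt_down
instance (ack_rtt : List Int) (ack_rtt_up : List Int) (ack_rtt_down : List Int) (out : List Int) : Decidable (Spec_get_ack_rtt ack_rtt ack_rtt_up ack_rtt_down out) := by unfold Spec_get_ack_rtt; infer_instance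

-- ===== CLAIM (what is proved, stated in full; the proofs are below) =====
def Claim_equal_get_ack_rtt : Prop := ∀ (ack_rtt : List Int) (ack_rtt_up : List Int) (ack_rtt_down : List Int), Dom_get_ack_rtt ack_rtt ack_rtt_up ack_rtt_down → Spec_get_ack_rtt ack_rtt ack_rtt_up ack_rtt_down (get_ack_rtt ack_rtt ack_rtt_up ack_rtt_down)

-- ===== LEMMAS AND PROOFS =====

-- the per-element tag both programs compute
def pvTag (up down : List Int) (i : Int) : Int :=
  if i ∈ up then i else if i ∈ down then -i else 0

lemma foldl_eq_map_tag (up down : List Int) (xs acc : List Int) :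
    xs.foldl (fun finger i =>
      if i ∈ up then finger ++ [i * 1]
      else if i ∈ down then finger ++ [i * (-1)]
      else finger ++ [i * 0]) acc = acc ++ xs.map (pvTag up down) := by
  induction xs generalizing acc with
  | nil => simp
  | cons x t ih =>
    simp only [List.foldl_cons, List.map_cons, ih, pvTag]
    split_ifs <;> simp

lemma getElem_alt (ack_rtt up down : List Int) (j : Nat) (hj : j < 13) :
    (get_ack_rtt_alt ack_rtt up down)[j]'(by simp [get_ack_rtt_alt]; omega) =
      if h : j < ack_rtt.length then pvTag up down (ack_rtt[j]'h) else 0 := by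
  simp [get_ack_rtt_alt]
  by_cases h : j < ack_rtt.length
  · simp [h, Nat.not_le.mpr h, pvTag]
  · simp [h, Nat.le_of_not_lt h]

theorem get_ack_rtt_spec : Claim_equal_get_ack_rtt := by
  intro ack_rtt up down _
  unfold Spec_get_ack_rtt
  unfold get_ack_rtt
  simp only [foldl_eq_map_tag, List.nil_append]
  have hlen_alt : (get_ack_rtt_alt ack_rtt up down).length = 13 := by
    simp [get_ack_rtt_alt]
  unfold pad_or_truncate
  by_cases hge : ((ack_rtt.map (pvTag up down)).length : Int) ≥ 13
  · rw [if_pos hge]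
    have h13 : (13 : Int) = ((13 : Nat) : Int) := by norm_num
    rw [h13, PySem.List.slice_to_natCast]
    apply List.ext_getElem
    · simp at hge ⊢; omega
    · intro j hj _
      have hj13 : j < 13 := by simp at hj; omega
      rw [getElem_alt ack_rtt up down j hj13]
      have hjlen : j < ack_rtt.length := by simp at hge; omega
      simp [hjlen]

  · rw [if_neg hge]
    have hlt : ack_rtt.length < 13 := by simp at hge; omega
    have hrep : PySem.List.pyRepeat [(0:Int)] (13 - ((ack_rtt.map (pvTag up down)).length : Int)) =
        List.replicate (13 - ack_rtt.length) 0 := by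
      rw [PySem.List.pyRepeat_singleton]
      congr 1
      simp only [List.length_map]
      omega
    rw [hrep]
    apply List.ext_getElem
    · simp [hlen_alt]; omega
    · intro j hj _
      have hj13 : j < 13 := by simp at hj; omega
      rw [getElem_alt ack_rtt up down j hj13]
      by_cases h : j < ack_rtt.length
      · simp [h]
      · rw [List.getElem_append_right (by simpa using Nat.le_of_not_lt h)]
        simp
        exact fun h' => absurd h' h
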